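-- pv_equiv track=rewrite | github.com/antiantilopa/Glorytopia | src/server/core/game_event.py | list_int32_to_list_bool
-- ===== SOURCE A (Python) =====
-- def list_int32_to_list_bool(x: list[int]) -> list[bool]:
--     result = []
--     for num in reversed(x):
--         for j in range(32):
--             result.append(1 & num)
--             num = num >> 1
--     result.reverse()
--     return result
-- ===== SOURCE B (Python) =====
-- def list_int32_to_list_bool(x: list[int]) -> list[bool]:
--     result = []
--     for num in x:
--         for c in format(num % 0x100000000, '032b'):
--             result.append(int(c))
--     return result
-- ===== Notes on version B (the rewrite author's own statement) =====
-- stated objective: idiomatic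
-- what changed: B walks the list in original order and emits each number's 32 bits MSB-first via format(num & 0xffffffff, '032b'), instead of A's reversed traversal with LSB-first shift extraction followed by a whole-list reverse.
import Mathlib
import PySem

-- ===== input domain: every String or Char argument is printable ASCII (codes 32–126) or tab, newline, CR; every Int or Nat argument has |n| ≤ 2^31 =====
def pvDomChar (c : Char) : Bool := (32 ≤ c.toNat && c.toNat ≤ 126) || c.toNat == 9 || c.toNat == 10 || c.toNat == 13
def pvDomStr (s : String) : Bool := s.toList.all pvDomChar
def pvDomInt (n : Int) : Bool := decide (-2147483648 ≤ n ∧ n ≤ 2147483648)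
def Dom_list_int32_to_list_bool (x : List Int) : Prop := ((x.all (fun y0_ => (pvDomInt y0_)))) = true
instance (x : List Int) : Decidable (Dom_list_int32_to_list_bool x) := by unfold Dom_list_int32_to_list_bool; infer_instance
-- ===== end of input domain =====

-- B emits each number's 32 bits MSB-first in original list order (binary-string formatting of num % 2^32), replacing A's reversed traversal + LSB-first shifts + final reverse; objective: idiomatic, same cost.


-- ===== PORT A =====
-- Port of A: walk reversed(x); for each num, 32 iterations appending 1&num and shifting; reverse at the end.
def list_int32_to_list_bool (x : List Int) : List Int :=
  let result :=
    x.reverse.foldl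
      (fun res num =>
        ((PySem.List.pyRange 0 32 1).foldl
          (fun (st : List Int × Int) _ =>
            (st.1 ++ [PySem.Int.band 1 st.2], st.2 >>> (1 : Nat)))
          (res, num)).1)
      []
  result.reverse

-- ===== PORT B =====
-- Port of format(m, '032b') followed by int(c) per character: the 32 binary digits of m,
-- most significant first, as Ints (exact for 0 ≤ m < 2^32, which num % 0x100000000 guarantees).
def pvBin32 : Nat → Int → List Int
  | 0, _ => []
  | Nat.succ k, m => pvBin32 k (PySem.Int.floordiv m 2) ++ [PySem.Int.mod m 2]

def list_int32_to_list_bool_alt (x : List Int) : List Int :=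
  x.foldl (fun result num => result ++ pvBin32 32 (PySem.Int.mod num 4294967296)) []

-- ===== PRECONDITION & SPEC =====
def Spec_list_int32_to_list_bool (x : List Int) (out : List Int) : Prop := out = list_int32_to_list_bool_alt x
instance (x : List Int) (out : List Int) : Decidable (Spec_list_int32_to_list_bool x out) := by unfold Spec_list_int32_to_list_bool; infer_instance

-- ===== CLAIM (what is proved, stated in full; the proofs are below) =====
def Claim_equal_list_int32_to_list_bool : Prop := ∀ (x : List Int), Dom_list_int32_to_list_bool x → Spec_list_int32_to_list_bool x (list_int32_to_list_bool x)

-- ===== LEMMAS AND PROOFS =====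

-- A's inner loop, bit by bit, LSB first.
def pvLsb : Nat → Int → List Int
  | 0, _ => []
  | Nat.succ k, n => PySem.Int.band 1 n :: pvLsb k (n >>> (1 : Nat))

theorem pvInner (l : List Int) : ∀ (res : List Int) (num : Int),
    ((l.foldl
      (fun (st : List Int × Int) _ =>
        (st.1 ++ [PySem.Int.band 1 st.2], st.2 >>> (1 : Nat)))
      (res, num)).1) = res ++ pvLsb l.length num := by
  induction l with
  | nil => intro res num; simp [pvLsb]
  | cons a t ih =>
    intro res num
    simp only [List.foldl_cons, List.length_cons, pvLsb]
    rw [ih]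
    simp

theorem pvEmodDivTwo (n : Int) (k : Nat) :
    (n % (2 ^ (k + 1))) / 2 = (n / 2) % (2 ^ k) := by
  have h2 : (2 : Int) ≠ 0 := by norm_num
  have hq : n / 2 / 2 ^ k = n / 2 ^ (k + 1) := by
    rw [Int.ediv_ediv_of_nonneg (by norm_num)]
    ring_nf
  rw [Int.emod_def, Int.emod_def, ← hq]
  have : n - 2 ^ (k + 1) * (n / 2 / 2 ^ k) = n + 2 * (-(2 ^ k * (n / 2 / 2 ^ k))) := by ring
  rw [this, Int.add_mul_ediv_left _ _ h2]
  ring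

theorem pvLsbRev (k : Nat) : ∀ (n : Int),
    (pvLsb k n).reverse = pvBin32 k (n % (2 ^ k)) := by
  induction k with
  | zero => intro n; simp [pvLsb, pvBin32]
  | succ k ih =>
    intro n
    simp only [pvLsb, List.reverse_cons, pvBin32]
    rw [ih]
    have hfd : PySem.Int.floordiv (n % (2 ^ (k + 1))) 2 = (n / 2) % (2 ^ k) := by
      rw [PySem.Int.floordiv_eq_ediv_of_pos (by norm_num), pvEmodDivTwo]
    have hmd : PySem.Int.mod (n % (2 ^ (k + 1))) 2 = PySem.Int.band 1 n := by
      rw [PySem.Int.band_comm, PySem.Int.band_one,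
        PySem.Int.mod_eq_emod_of_pos (by norm_num),
        PySem.Int.mod_eq_emod_of_pos (by norm_num)]
      exact Int.emod_emod_of_dvd n ⟨2 ^ k, by ring⟩
    have hsh : n >>> (1 : Nat) = n / 2 := by
      rw [Int.shiftRight_eq_div_pow]; norm_num
    rw [hfd, hmd, hsh]

theorem pvPerNum (n : Int) :
    (pvLsb 32 n).reverse = pvBin32 32 (PySem.Int.mod n 4294967296) := by
  rw [PySem.Int.mod_eq_emod_of_pos (by norm_num)]
  have := pvLsbRev 32 n
  norm_num at this
  exact this

theorem pvA_flat (x : List Int) :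
    list_int32_to_list_bool x = x.flatMap (fun n => (pvLsb 32 n).reverse) := by
  unfold list_int32_to_list_bool
  have hlen : (PySem.List.pyRange 0 32 1).length = 32 := by decide
  have hbody : ∀ (res : List Int) (num : Int),
      ((PySem.List.pyRange 0 32 1).foldl
        (fun (st : List Int × Int) _ =>
          (st.1 ++ [PySem.Int.band 1 st.2], st.2 >>> (1 : Nat)))
        (res, num)).1 = res ++ pvLsb 32 num := by
    intro res num; rw [pvInner, hlen]
  simp only [hbody]
  rw [PySem.List.foldl_append_eq_flatMap]
  simp only [List.nil_append, List.reverse_flatMap, List.reverse_reverse]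
  rfl

theorem pvB_flat (x : List Int) :
    list_int32_to_list_bool_alt x
      = x.flatMap (fun n => pvBin32 32 (PySem.Int.mod n 4294967296)) := by
  unfold list_int32_to_list_bool_alt
  rw [PySem.List.foldl_append_eq_flatMap]
  simp

-- ===== VERDICT (by name: the statement is the Claim_ definition above) =====
theorem list_int32_to_list_bool_spec : Claim_equal_list_int32_to_list_bool := by
  intro x _
  unfold Spec_list_int32_to_list_bool
  rw [pvA_flat, pvB_flat]
  exact List.flatMap_congr (fun n _ => pvPerNum n)
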